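-- pv_equiv track=rewrite | github.com/nji005/tugas-baspro2 | tugas matriks/matriks.py | buat_matriks_5x5
-- ===== SOURCE A (Python) =====
-- def buat_matriks_5x5(nilai_awal):
--     """Membuat matriks 5x5 dengan angka berurutan mulai dari nilai_awal"""
--     matriks = []
--     angka = nilai_awal
--     for i in range(5):
--         baris = []
--         for j in range(5):
--             baris.append(angka)
--             angka += 1
--         matriks.append(baris)
--     return matriks
-- ===== SOURCE B (Python) =====
-- def buat_matriks_5x5(nilai_awal):
--     """Membuat matriks 5x5 dengan angka berurutan mulai dari nilai_awal"""
--     flat = list(range(nilai_awal, nilai_awal + 25))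
--     return [flat[k:k + 5] for k in range(0, 25, 5)]
-- ===== Notes on version B (the rewrite author's own statement) =====
-- stated objective: alternative
-- what changed: Two staged passes instead of one accumulator loop: first materialise the whole flat run of consecutive values as a single range, then chunk it into five-element rows with slices, removing the nested loops and the threaded counter.
import Mathlib
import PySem

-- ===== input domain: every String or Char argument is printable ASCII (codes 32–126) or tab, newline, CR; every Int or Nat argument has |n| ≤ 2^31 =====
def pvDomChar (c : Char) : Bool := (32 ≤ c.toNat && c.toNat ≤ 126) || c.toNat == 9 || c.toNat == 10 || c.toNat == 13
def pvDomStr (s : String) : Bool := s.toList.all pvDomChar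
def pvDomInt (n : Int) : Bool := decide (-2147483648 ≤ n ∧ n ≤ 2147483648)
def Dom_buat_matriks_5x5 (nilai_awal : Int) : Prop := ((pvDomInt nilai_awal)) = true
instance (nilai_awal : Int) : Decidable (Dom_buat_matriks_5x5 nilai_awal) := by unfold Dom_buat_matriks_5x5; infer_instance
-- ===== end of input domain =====

-- B builds the flat 25-element range first and then slices it into rows (staged passes instead of a threaded counter); same cost, alternative decomposition.


-- ===== PORT A =====
-- literal transliteration of A: accumulator (matriks, angka) threaded through nested loops
def buat_matriks_5x5 (nilai_awal : Int) : List (List Int) :=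
  let init : List (List Int) × Int := ([], nilai_awal)
  let result := (PySem.List.pyRange 0 5 1).foldl
    (fun (st : List (List Int) × Int) _i =>
      let inner := (PySem.List.pyRange 0 5 1).foldl
        (fun (bst : List Int × Int) _j => (bst.1 ++ [bst.2], bst.2 + 1))
        ([], st.2)
      (st.1 ++ [inner.1], inner.2))
    init
  result.1

-- ===== PORT B =====
-- literal transliteration of Source B: flat range then slices flat[k:k+5]
def buat_matriks_5x5_alt (nilai_awal : Int) : List (List Int) :=
  let flat := PySem.List.pyRange nilai_awal (nilai_awal + 25) 1
  (PySem.List.pyRange 0 25 5).map (fun k => PySem.List.slice flat (some k) (some (k + 5)))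

-- ===== PRECONDITION & SPEC =====
def Spec_buat_matriks_5x5 (nilai_awal : Int) (out : List (List Int)) : Prop := out = buat_matriks_5x5_alt nilai_awal
instance (nilai_awal : Int) (out : List (List Int)) : Decidable (Spec_buat_matriks_5x5 nilai_awal out) := by unfold Spec_buat_matriks_5x5; infer_instance

-- ===== CLAIM (what is proved, stated in full; the proofs are below) =====
def Claim_equal_buat_matriks_5x5 : Prop := ∀ (nilai_awal : Int), Dom_buat_matriks_5x5 nilai_awal → Spec_buat_matriks_5x5 nilai_awal (buat_matriks_5x5 nilai_awal)

-- ===== LEMMAS AND PROOFS =====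

-- ===== VERDICT (by name: the statement is the Claim_ definition above) =====
theorem buat_matriks_5x5_spec : Claim_equal_buat_matriks_5x5 := by
  intro n _
  show _ = _
  simp [buat_matriks_5x5, buat_matriks_5x5_alt, PySem.List.pyRange, PySem.List.slice,
        List.range_succ]
  omega
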